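-- pv_equiv track=rewrite | github.com/Ch-Bhargav/Scrapper | app/services/transform.py | split_title_and_body
-- ===== SOURCE A (Python) =====
-- from typing import Dict, Tuple
--
-- def split_title_and_body(text: str) -> Tuple[str, str]:
--     lines = [ln.rstrip() for ln in (text or "").splitlines()]
--     title = ""
--     body_lines = []
--     found = False
--     for ln in lines:
--         if not found and ln.strip():
--             title = ln.strip()
--             found = True
--             continue
--         if found:
--             body_lines.append(ln)
--     return title or "Untitled", "\n".join(body_lines).strip() or ""
-- ===== SOURCE B (Python) =====
-- def split_title_and_body(text: str):
--     lines = [ln.rstrip() for ln in (text or "").splitlines()]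
--     while lines and not lines[0].strip():
--         lines.pop(0)
--     if not lines:
--         return "Untitled", ""
--     return lines[0].strip(), "\n".join(lines[1:]).strip()
-- ===== Notes on version B (the rewrite author's own statement) =====
-- stated objective: simpler
-- what changed: Replaces the flag-driven single-pass accumulation (title/body_lines/found state) by dropping the empty-line prefix, taking the first remaining line as title and slicing the rest as body.
import Mathlib
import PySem

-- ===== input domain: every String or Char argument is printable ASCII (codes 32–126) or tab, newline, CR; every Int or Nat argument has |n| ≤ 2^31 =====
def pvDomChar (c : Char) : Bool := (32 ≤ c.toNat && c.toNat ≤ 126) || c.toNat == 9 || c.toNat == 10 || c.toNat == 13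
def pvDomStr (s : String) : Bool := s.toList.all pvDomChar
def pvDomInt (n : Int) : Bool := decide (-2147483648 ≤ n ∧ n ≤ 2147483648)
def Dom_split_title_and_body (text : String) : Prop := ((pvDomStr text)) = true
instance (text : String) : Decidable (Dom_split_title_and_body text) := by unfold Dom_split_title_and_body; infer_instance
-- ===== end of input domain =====

-- B replaces A's flag-driven accumulation by dropping the blank-line prefix then head/slice (simpler decomposition; same cost).


-- ===== PORT A =====
-- flag-driven single pass: state (title, body_lines, found)
def pvStepA (st : String × List String × Bool) (ln : String) : String × List String × Bool :=
  let (title, body, found) := st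
  if !found && (PySem.Str.strip ln != "") then (PySem.Str.strip ln, body, true)
  else if found then (title, body ++ [ln], found)
  else (title, body, found)

def split_title_and_body (text : String) : String × String :=
  let lines := (PySem.Str.splitlines text).map PySem.Str.rstrip
  let s := lines.foldl pvStepA ("", ([] : List String), false)
  ((if s.1 == "" then "Untitled" else s.1),
   (let b := PySem.Str.strip (PySem.Str.join "\n" s.2.1); if b == "" then "" else b))

-- ===== PORT B =====
-- B: drop the blank-line prefix (the while/pop loop), then head = title, tail = body
def pvDropBlank (lines : List String) : List String :=
  match lines with
  | [] => []
  | ln :: rest => if PySem.Str.strip ln == "" then pvDropBlank rest else ln :: rest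

def split_title_and_body_alt (text : String) : String × String :=
  match pvDropBlank ((PySem.Str.splitlines text).map PySem.Str.rstrip) with
  | [] => ("Untitled", "")
  | ln :: rest => (PySem.Str.strip ln, PySem.Str.strip (PySem.Str.join "\n" rest))

-- ===== PRECONDITION & SPEC =====
def Spec_split_title_and_body (text : String) (out : String × String) : Prop := out = split_title_and_body_alt text
instance (text : String) (out : String × String) : Decidable (Spec_split_title_and_body text out) := by unfold Spec_split_title_and_body; infer_instance

-- ===== CLAIM (what is proved, stated in full; the proofs are below) =====
def Claim_equal_split_title_and_body : Prop := ∀ (text : String), Dom_split_title_and_body text → Spec_split_title_and_body text (split_title_and_body text)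

-- ===== LEMMAS AND PROOFS =====
lemma foldl_stepA_found (rest : List String) (t : String) (b : List String) :
    rest.foldl pvStepA (t, b, true) = (t, b ++ rest, true) := by
  induction rest generalizing b with
  | nil => simp
  | cons x xs ih => simp [pvStepA, ih]

lemma foldl_stepA_eq (ls : List String) :
    ls.foldl pvStepA ("", ([] : List String), false) =
      (match pvDropBlank ls with
       | [] => ("", ([] : List String), false)
       | ln :: rest => (PySem.Str.strip ln, rest, true)) := by
  induction ls with
  | nil => simp [pvDropBlank]
  | cons x xs ih =>
    by_cases h : PySem.Str.strip x = ""
    · simpa [pvDropBlank, pvStepA, h] using ih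
    · have hb : (PySem.Str.strip x == "") = false := by simpa using h
      simp [pvDropBlank, pvStepA, hb, h, foldl_stepA_found]


lemma dropBlank_head_ne (ls : List String) (ln : String) (rest : List String)
    (h : pvDropBlank ls = ln :: rest) : (PySem.Str.strip ln == "") = false := by
  induction ls with
  | nil => simp [pvDropBlank] at h
  | cons x xs ih =>
    by_cases hx : PySem.Str.strip x = ""
    · exact ih (by simpa [pvDropBlank, hx] using h)
    · simp [pvDropBlank, hx] at h
      rcases h with ⟨h1, _⟩
      simpa [← h1] using hx

-- ===== VERDICT (by name: the statement is the Claim_ definition above) =====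
theorem split_title_and_body_spec : Claim_equal_split_title_and_body := by
  intro text _
  unfold Spec_split_title_and_body split_title_and_body split_title_and_body_alt
  simp only []
  rw [foldl_stepA_eq]
  cases h : pvDropBlank ((PySem.Str.splitlines text).map PySem.Str.rstrip) with
  | nil => decide
  | cons ln rest =>
    have hln := dropBlank_head_ne _ _ _ h
    simp only [hln]
    split <;> simp_all
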